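-- pv_equiv track=rewrite | github.com/MariuszWroblewski/MetInzWiedz | main.py | dzielenieKolorami
-- ===== SOURCE A (Python) =====
-- def dzielenieKolorami(lista):
--     wynik = {}
--     for wektor in lista:
--         if wektor[-1] in wynik.keys():
--             wynik[wektor[-1]].append(wektor[0:-1])
--         else:
--             wynik[wektor[-1]] = [wektor[0:-1]]
--     return wynik
-- ===== SOURCE B (Python) =====
-- def dzielenieKolorami(lista):
--     # pass 1: distinct last elements in first-appearance order
--     klucze = []
--     for wektor in lista:
--         if wektor[-1] not in klucze:
--             klucze.append(wektor[-1])
--     # pass 2: for each key, collect the prefixes of the matching vectors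
--     return {k: [wektor[0:-1] for wektor in lista if wektor[-1] == k] for k in klucze}
-- ===== Notes on version B (the rewrite author's own statement) =====
-- stated objective: alternative
-- what changed: A builds the dict in a single streaming pass appending to the current group; B first collects the distinct last-elements in first-appearance order and then builds each group by a separate filtering scan of the whole list.
-- outside the precondition, e.g. on dzielenieKolorami([[1, 2], []]): A raises IndexError, B raises IndexError
import Mathlib
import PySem

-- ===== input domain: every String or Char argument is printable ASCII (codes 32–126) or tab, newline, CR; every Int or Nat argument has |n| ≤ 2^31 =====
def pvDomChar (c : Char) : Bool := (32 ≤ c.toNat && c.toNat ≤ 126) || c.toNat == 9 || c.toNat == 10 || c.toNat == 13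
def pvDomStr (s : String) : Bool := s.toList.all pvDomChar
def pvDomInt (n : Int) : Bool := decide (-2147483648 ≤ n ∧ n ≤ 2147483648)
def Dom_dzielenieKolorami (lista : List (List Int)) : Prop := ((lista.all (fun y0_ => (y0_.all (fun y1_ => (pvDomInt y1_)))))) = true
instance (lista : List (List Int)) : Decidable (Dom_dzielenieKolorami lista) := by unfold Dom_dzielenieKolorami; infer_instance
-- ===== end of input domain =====

-- B replaces A's single streaming dict accumulation by two phases (distinct keys first,
-- then one filtering scan per key); objective: alternative decomposition, not faster.

-- ===== PORT A =====
-- A: one pass, a dict accumulated as it goes; 'wektor[-1]' raises IndexError on an empty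
-- inner list (the 'none' branch below is unreachable under Pre_).
def dzielenieKolorami (lista : List (List Int)) : List (Int × List (List Int)) :=
  (lista.foldl (fun wynik wektor =>
      match PySem.List.pyGet? wektor (-1) with
      | none => wynik
      | some k =>
        match PySem.Dict.get? wynik k with
        | some v => PySem.Dict.insert wynik k (v ++ [PySem.List.slice wektor (some 0) (some (-1))])
        | none   => PySem.Dict.insert wynik k [PySem.List.slice wektor (some 0) (some (-1))])
    PySem.Dict.empty).items

-- ===== PORT B =====
-- B: pass 1 collects the distinct last elements in first-appearance order; pass 2 filters
-- the whole list per key ('none' again unreachable under Pre_).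
def dzielenieKolorami_alt (lista : List (List Int)) : List (Int × List (List Int)) :=
  let klucze : PySem.Set Int := lista.foldl (fun ks wektor =>
      match PySem.List.pyGet? wektor (-1) with
      | none => ks
      | some k => PySem.Set.add ks k) PySem.Set.empty
  klucze.map (fun k =>
    (k, (lista.filter (fun wektor => PySem.List.pyGet? wektor (-1) == some k)).map
          (fun wektor => PySem.List.slice wektor (some 0) (some (-1)))))

-- ===== PRECONDITION & SPEC =====
-- Pre_ excludes lists containing an empty inner vector: there 'wektor[-1]' raises IndexError in A (and in B).
def Pre_dzielenieKolorami (lista : List (List Int)) : Prop := ∀ w ∈ lista, w ≠ []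
instance (lista : List (List Int)) : Decidable (Pre_dzielenieKolorami lista) := by unfold Pre_dzielenieKolorami; infer_instance
def pvWitness_dzielenieKolorami : List (List Int) := [[1, 2, 7], [3, 7], [4, 5]]

def Spec_dzielenieKolorami (lista : List (List Int)) (out : List (Int × List (List Int))) : Prop := out = dzielenieKolorami_alt lista
instance (lista : List (List Int)) (out : List (Int × List (List Int))) : Decidable (Spec_dzielenieKolorami lista out) := by unfold Spec_dzielenieKolorami; infer_instance

-- ===== CLAIM (what is proved, stated in full; the proofs are below) =====
def Claim_equal_dzielenieKolorami : Prop := ∀ (lista : List (List Int)), Dom_dzielenieKolorami lista → Pre_dzielenieKolorami lista → Spec_dzielenieKolorami lista (dzielenieKolorami lista)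

-- ===== LEMMAS AND PROOFS =====

-- the (key, prefix) pairs of the vectors that have a last element
def pvPairs (lista : List (List Int)) : List (Int × List Int) :=
  lista.filterMap (fun w => (PySem.List.pyGet? w (-1)).map
    (fun k => (k, PySem.List.slice w (some 0) (some (-1)))))

theorem pvPairs_cons_none {w : List Int} (t : List (List Int)) (h : PySem.List.pyGet? w (-1) = none) :
    pvPairs (w :: t) = pvPairs t := by
  simp [pvPairs, h]

theorem pvPairs_cons_some {w : List Int} {k : Int} (t : List (List Int)) (h : PySem.List.pyGet? w (-1) = some k) :
    pvPairs (w :: t) = (k, PySem.List.slice w (some 0) (some (-1))) :: pvPairs t := by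
  simp [pvPairs, h]

-- A's fold over lista equals the modify-fold over pvPairs lista
theorem pvFoldA_eq (lista : List (List Int)) (d : PySem.Dict Int (List (List Int))) :
    lista.foldl (fun wynik wektor =>
      match PySem.List.pyGet? wektor (-1) with
      | none => wynik
      | some k =>
        match PySem.Dict.get? wynik k with
        | some v => PySem.Dict.insert wynik k (v ++ [PySem.List.slice wektor (some 0) (some (-1))])
        | none   => PySem.Dict.insert wynik k [PySem.List.slice wektor (some 0) (some (-1))]) d
    = (pvPairs lista).foldl (fun d p => d.modify p.1 [] (· ++ [p.2])) d := by
  induction lista generalizing d with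
  | nil => rfl
  | cons w t ih =>
    cases h : PySem.List.pyGet? w (-1) with
    | none => rw [pvPairs_cons_none t h]; simp only [List.foldl_cons, h]; exact ih d
    | some k =>
      rw [pvPairs_cons_some t h]
      simp only [List.foldl_cons, h]
      cases h2 : PySem.Dict.get? d k <;>
        · rw [ih]
          congr 1
          simp [PySem.Dict.modify, PySem.Dict.getD_eq_get?_getD, h2]

-- B's key pass is the ordered dedup of the keys of pvPairs
theorem pvKeysB_eq (lista : List (List Int)) (ks : PySem.Set Int) :
    lista.foldl (fun ks wektor =>
      match PySem.List.pyGet? wektor (-1) with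
      | none => ks
      | some k => PySem.Set.add ks k) ks
    = PySem.Set.update ks ((pvPairs lista).map (·.1)) := by
  induction lista generalizing ks with
  | nil => rfl
  | cons w t ih =>
    cases h : PySem.List.pyGet? w (-1) with
    | none => rw [pvPairs_cons_none t h]; simp only [List.foldl_cons, h]; exact ih ks
    | some k =>
      rw [pvPairs_cons_some t h]
      simp only [List.foldl_cons, h, List.map_cons]
      rw [ih]
      rfl

-- B's per-key filter of lista is the corresponding filter of pvPairs
theorem pvGroupB_eq (lista : List (List Int)) (k : Int) :
    ((lista.filter (fun wektor => PySem.List.pyGet? wektor (-1) == some k)).map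
       (fun wektor => PySem.List.slice wektor (some 0) (some (-1))))
    = ((pvPairs lista).filter (fun p => p.1 == k)).map (·.2) := by
  induction lista with
  | nil => rfl
  | cons w t ih =>
    cases h : PySem.List.pyGet? w (-1) with
    | none => rw [pvPairs_cons_none t h]; simp only [List.filter_cons, h]; simpa using ih
    | some j =>
      rw [pvPairs_cons_some t h]
      simp only [List.filter_cons, h]
      by_cases hk : j = k
      · subst hk; simpa using ih
      · simp only [beq_iff_eq, Option.some.injEq]
        rw [if_neg (by simp [hk]), if_neg (by simp [hk])]
        exact ih

-- ===== VERDICT (by name: the statement is the Claim_ definition above) =====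
theorem dzielenieKolorami_spec : Claim_equal_dzielenieKolorami := by
  intro lista _ _
  unfold Spec_dzielenieKolorami dzielenieKolorami dzielenieKolorami_alt
  rw [pvFoldA_eq, pvKeysB_eq]
  rw [PySem.Dict.items_eq_map_keys _
        (PySem.Dict.nodup_keys_foldl_modify_key (pvPairs lista) Prod.fst []
          (fun _ p => (· ++ [p.2])) PySem.Dict.empty (by simp [PySem.Dict.keys_empty])) []]
  rw [PySem.Dict.keys_foldl_modify_key (pvPairs lista) Prod.fst [] (fun _ p => (· ++ [p.2]))]
  simp only [PySem.Dict.getD_foldl_modify_append, PySem.Dict.getD_empty, PySem.Dict.keys_empty,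
    List.nil_append, pvGroupB_eq]
  rfl
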